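-- pv_equiv track=rewrite | github.com/sujinjwa/Algorithm | programmers/Level1/의상.py | solution
-- ===== SOURCE A (Python) =====
-- def solution(clothes):
--     dict = {}
--     for c in clothes:
--         name, type = c[0], c[1]
--
--         if type in dict:
--             dict[type].append(name)
--         else:
--             dict[type] = [name]
--
--     arr = [
--         [] for _ in range(len(dict))
--     ]
--
--     index = 0
--     for d in dict:
--         arr[index] = dict[d]
--         index += 1
--
--     answer = 0
--     # i = 시작점
--     for i in range(len(arr)):
--         temp = len(arr[i])
--         answer += temp
--         if i != len(arr)-1:
--             # j = 끝 점(계산 길이, 1,2,3,4,...len(arr) 로 늘어나야 함)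
--             for j in range(i+1, len(arr)):
--                 temp *= len(arr[j])
--                 answer += temp
--
--     return answer
-- ===== SOURCE B (Python) =====
-- def solution(clothes):
--     counts = {}
--     for c in clothes:
--         t = c[1]
--         counts[t] = counts.get(t, 0) + 1
--     answer = 0
--     g = 0
--     for n in counts.values():
--         g = n * (1 + g)
--         answer += g
--     return answer
-- ===== Notes on version B (the rewrite author's own statement) =====
-- stated objective: alternative
-- what changed: Replaces A's grouping dict of name lists plus a double loop over all contiguous index ranges of the type counts by a count dict and a single-pass recurrence g = n*(1+g), ans += g over the counts.
import Mathlib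
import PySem

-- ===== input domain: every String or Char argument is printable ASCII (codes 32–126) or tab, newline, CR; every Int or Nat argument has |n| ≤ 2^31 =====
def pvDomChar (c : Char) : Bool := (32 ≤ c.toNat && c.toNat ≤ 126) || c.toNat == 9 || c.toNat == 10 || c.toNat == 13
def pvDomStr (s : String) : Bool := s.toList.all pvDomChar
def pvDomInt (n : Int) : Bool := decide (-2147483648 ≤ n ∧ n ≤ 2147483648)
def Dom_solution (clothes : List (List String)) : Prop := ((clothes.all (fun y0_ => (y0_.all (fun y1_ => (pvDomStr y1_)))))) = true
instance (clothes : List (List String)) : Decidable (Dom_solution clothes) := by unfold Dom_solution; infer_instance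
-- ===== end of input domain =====

-- B replaces A's grouping dict of name lists and its double loop over all contiguous
-- index ranges by a count dict and a one-pass recurrence g := n*(1+g); ans += g.

-- ===== PORT A =====
def solution (clothes : List (List String)) : Int :=
  let d : PySem.Dict String (List String) :=
    clothes.foldl (fun d c =>
      let name := PySem.List.pyGetD c 0 ""
      let typ := PySem.List.pyGetD c 1 ""
      if d.contains typ then d.modify typ [] (fun l => l ++ [name])
      else d.insert typ [name]) PySem.Dict.empty
  let arr0 : List (List String) := (PySem.List.pyRange 0 (d.size : Int) 1).map (fun _ => [])
  let arr := (d.keys.foldl (fun (s : List (List String) × Int) k =>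
      (PySem.List.pySetD s.1 s.2 (d.getD k []), s.2 + 1)) (arr0, 0)).1
  let n := PySem.List.len arr
  (PySem.List.pyRange 0 n 1).foldl (fun answer i =>
      let temp := PySem.List.len (PySem.List.pyGetD arr i [])
      let answer := answer + temp
      if i ≠ n - 1 then
        ((PySem.List.pyRange (i + 1) n 1).foldl (fun (s : Int × Int) j =>
            let t := s.1 * PySem.List.len (PySem.List.pyGetD arr j [])
            (t, s.2 + t)) (temp, answer)).2
      else answer) 0

-- ===== PORT B =====
def solution_alt (clothes : List (List String)) : Int :=
  let counts : PySem.Dict String Int :=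
    clothes.foldl (fun d c =>
      let t := PySem.List.pyGetD c 1 ""
      d.insert t (d.getD t 0 + 1)) PySem.Dict.empty
  (counts.values.foldl (fun (s : Int × Int) n =>
      let g := n * (1 + s.2)
      (s.1 + g, g)) (0, 0)).1

-- ===== PRECONDITION & SPEC =====
-- Pre_ excludes exactly the inputs where Python A (and B) raise IndexError: some entry
-- has fewer than two elements, so c[0] or c[1] fails.
def Pre_solution (clothes : List (List String)) : Prop :=
  ∀ c ∈ clothes, 2 ≤ c.length
instance (clothes : List (List String)) : Decidable (Pre_solution clothes) := by
  unfold Pre_solution; infer_instance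

def pvWitness_solution : List (List String) :=
  [["a", "top"], ["b", "top"], ["c", "pants"]]

def Spec_solution (clothes : List (List String)) (out : Int) : Prop := out = solution_alt clothes
instance (clothes : List (List String)) (out : Int) : Decidable (Spec_solution clothes out) := by
  unfold Spec_solution; infer_instance

-- ===== CLAIM (what is proved, stated in full; the proofs are below) =====
def Claim_equal_solution : Prop := ∀ (clothes : List (List String)), Dom_solution clothes → Pre_solution clothes → Spec_solution clothes (solution clothes)

-- ===== LEMMAS AND PROOFS =====

-- sum of products of the prefixes of l  (f(i) in the recurrence)
def pvP : List Int → Int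
  | [] => 0
  | x :: xs => x * (1 + pvP xs)

-- sum over all contiguous non-empty segments of l of the product of its entries
def pvSeg : List Int → Int
  | [] => 0
  | x :: xs => pvP (x :: xs) + pvSeg xs

lemma pvB_fold (l : List Int) (a g : Int) :
    (l.foldl (fun (s : Int × Int) n => (s.1 + n * (1 + s.2), n * (1 + s.2))) (a, g)).1
      = a + pvSeg l + g * pvP l := by
  induction l generalizing a g with
  | nil => simp [pvSeg, pvP]
  | cons x xs ih =>
      simp only [List.foldl_cons]
      rw [ih]
      simp only [pvSeg, pvP]
      ring

lemma pvInner_fold (l : List (List String)) (t a : Int) :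
    (l.foldl (fun (s : Int × Int) v =>
        (s.1 * PySem.List.len v, s.2 + s.1 * PySem.List.len v)) (t, a)).2
      = a + t * pvP (l.map PySem.List.len) := by
  induction l generalizing t a with
  | nil => simp [pvP]
  | cons x xs ih =>
      simp only [List.foldl_cons, List.map_cons]
      rw [ih]
      simp only [pvP]
      ring

lemma pvSum_tails (ls : List Int) :
    ((List.range ls.length).map (fun k => pvP (ls.drop k))).sum = pvSeg ls := by
  induction ls with
  | nil => simp [pvSeg]
  | cons x xs ih =>
      rw [List.length_cons, List.range_succ_eq_map]
      simp only [List.map_cons, List.map_map, Function.comp_def, List.drop_zero,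
        List.drop_succ_cons, List.sum_cons]
      rw [ih]
      simp [pvSeg]

lemma pvSet_junction {α : Type} (pre t : List α) (x v : α) :
    (pre ++ x :: t).set pre.length v = pre ++ v :: t := by
  induction pre with
  | nil => simp
  | cons p ps ih => simp [ih]

lemma pvSetFold (ks : List String) (v : String → List String) :
    ∀ (pre : List (List String)),
      ((ks.foldl (fun (s : List (List String) × Int) k =>
          (PySem.List.pySetD s.1 s.2 (v k), s.2 + 1))
        (pre ++ List.replicate ks.length ([] : List String), (pre.length : Int))).1)
        = pre ++ ks.map v := by
  induction ks with
  | nil => intro pre; simp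
  | cons k ks ih =>
      intro pre
      simp only [List.length_cons, List.replicate_succ, List.foldl_cons, List.map_cons]
      rw [PySem.List.pySetD_natCast, pvSet_junction]
      have h1 : ((pre.length : Int) + 1) = (((pre ++ [v k]).length : Nat) : Int) := by
        simp
      have h2 : pre ++ v k :: List.replicate ks.length ([] : List String)
          = (pre ++ [v k]) ++ List.replicate ks.length ([] : List String) := by simp
      rw [h1, h2, ih (pre ++ [v k])]
      simp

def pvDA (clothes : List (List String)) : PySem.Dict String (List String) :=
  clothes.foldl (fun d c =>
    d.modify (PySem.List.pyGetD c 1 "") [] (fun l => l ++ [PySem.List.pyGetD c 0 ""]))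
    PySem.Dict.empty

lemma pvDictA (clothes : List (List String)) :
    clothes.foldl (fun d c =>
      if d.contains (PySem.List.pyGetD c 1 "") then
        d.modify (PySem.List.pyGetD c 1 "") [] (fun l => l ++ [PySem.List.pyGetD c 0 ""])
      else d.insert (PySem.List.pyGetD c 1 "") [PySem.List.pyGetD c 0 ""]) PySem.Dict.empty
    = pvDA clothes := by
  unfold pvDA
  apply PySem.List.foldl_congr_mem
  intro d c _
  by_cases h : d.contains (PySem.List.pyGetD c 1 "") = true
  · simp [h]
  · simp only [Bool.not_eq_true] at h
    simp [h, PySem.Dict.modify, PySem.Dict.getD_of_not_contains]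

lemma pvDA_keys (clothes : List (List String)) :
    (pvDA clothes).keys
      = PySem.Set.ofList (clothes.map (fun c => PySem.List.pyGetD c 1 "")) := by
  unfold pvDA
  rw [PySem.Dict.keys_foldl_modify_key clothes (fun c => PySem.List.pyGetD c 1 "") []
    (fun _ c => (fun l => l ++ [PySem.List.pyGetD c 0 ""]))]
  simp [PySem.Set.update_nil_left]

lemma pvDA_getD (clothes : List (List String)) (t : String) :
    (pvDA clothes).getD t []
      = ((clothes.map (fun c => (PySem.List.pyGetD c 1 "", PySem.List.pyGetD c 0 ""))).filter
          (fun p => p.1 == t)).map (fun p => p.2) := by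
  unfold pvDA
  rw [show (fun (d : PySem.Dict String (List String)) (c : List String) =>
        d.modify (PySem.List.pyGetD c 1 "") [] (fun l => l ++ [PySem.List.pyGetD c 0 ""]))
      = (fun (d : PySem.Dict String (List String)) (c : List String) =>
        (fun (d : PySem.Dict String (List String)) (p : String × String) =>
          d.modify p.1 [] (fun l => l ++ [p.2]))
          d ((fun c => (PySem.List.pyGetD c 1 "", PySem.List.pyGetD c 0 "")) c)) from rfl]
  rw [← List.foldl_map (f := fun c => (PySem.List.pyGetD c 1 "", PySem.List.pyGetD c 0 ""))
    (g := fun (d : PySem.Dict String (List String)) (p : String × String) =>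
      d.modify p.1 [] (fun l => l ++ [p.2]))]
  rw [PySem.Dict.getD_foldl_modify_append]
  simp

lemma pvDA_len (clothes : List (List String)) (t : String) :
    PySem.List.len ((pvDA clothes).getD t [])
      = ((clothes.map (fun c => PySem.List.pyGetD c 1 "")).count t : Int) := by
  rw [pvDA_getD]
  simp only [PySem.List.len_eq, List.length_map, List.count_eq_countP, List.countP_map,
    Function.comp_def]
  norm_cast
  rw [← List.countP_eq_length_filter]
  simp [List.countP_map, Function.comp_def]

lemma pvArr (d : PySem.Dict String (List String)) :
    ((d.keys.foldl (fun (s : List (List String) × Int) k =>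
        (PySem.List.pySetD s.1 s.2 (d.getD k []), s.2 + 1))
      ((PySem.List.pyRange 0 (d.size : Int) 1).map (fun _ => []), 0)).1)
      = d.keys.map (fun k => d.getD k []) := by
  have h : (PySem.List.pyRange 0 (d.size : Int) 1).map (fun _ => ([] : List String))
      = List.replicate d.keys.length [] := by
    rw [PySem.List.pyRange_zero_nat]
    simp [PySem.Dict.size, PySem.Dict.keys, Function.comp_def, List.map_const']
  rw [h]
  have := pvSetFold d.keys (fun k => d.getD k []) []
  simpa using this

lemma pvOuter (arr : List (List String)) :
    (PySem.List.pyRange 0 (PySem.List.len arr) 1).foldl (fun answer i =>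
        let temp := PySem.List.len (PySem.List.pyGetD arr i [])
        let answer := answer + temp
        if i ≠ PySem.List.len arr - 1 then
          ((PySem.List.pyRange (i + 1) (PySem.List.len arr) 1).foldl (fun (s : Int × Int) j =>
              let t := s.1 * PySem.List.len (PySem.List.pyGetD arr j [])
              (t, s.2 + t)) (temp, answer)).2
        else answer) 0 = pvSeg (arr.map PySem.List.len) := by
  have hlen : PySem.List.len arr = (arr.length : Int) := by simp
  rw [hlen]
  dsimp only
  rw [PySem.List.foldl_congr_mem _ _
      (fun (a : Int) (i : Int) => a + pvP ((arr.drop i.toNat).map PySem.List.len)) 0 ?_]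
  · rw [PySem.List.foldl_add]
    rw [PySem.List.pyRange_zero_nat]
    simp only [List.map_map, Function.comp_def, Int.toNat_natCast, zero_add]
    have : ∀ k : Nat, (arr.drop k).map PySem.List.len = (arr.map PySem.List.len).drop k := by
      intro k; rw [List.map_drop]
    simp only [this]
    have hl : arr.length = (arr.map PySem.List.len).length := by simp
    rw [hl, pvSum_tails]
  · intro a i hi
    rw [PySem.List.mem_pyRange_one] at hi
    obtain ⟨h0, h1⟩ := hi
    have hlt : i.toNat < arr.length := by omega
    have hi' : i = (i.toNat : Int) := by omega
    have hdrop : arr.drop i.toNat = arr[i.toNat] :: arr.drop (i.toNat + 1) :=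
      List.drop_eq_getElem_cons hlt
    dsimp only
    rw [hi']
    simp only [PySem.List.pyGetD_natCast, Int.toNat_natCast]
    have hget : arr.getD i.toNat ([] : List String) = arr[i.toNat] :=
      List.getD_eq_getElem _ _ hlt
    rw [hget]
    by_cases hcase : ((i.toNat : Int)) = (arr.length : Int) - 1
    · rw [if_neg (not_not_intro hcase)]
      have hend : arr.drop (i.toNat + 1) = [] := by
        apply List.drop_eq_nil_of_le; omega
      rw [hdrop, hend]
      simp only [List.map_cons, List.map_nil, pvP]
      ring
    · rw [if_pos hcase]
      rw [PySem.List.foldl_pyRange_pyGetD' arr []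
        (fun (s : Int × Int) v => (s.1 * PySem.List.len v, s.2 + s.1 * PySem.List.len v))
        _ (by omega : (0:Int) ≤ (i.toNat : Int) + 1)]
      rw [pvInner_fold]
      have h2 : ((i.toNat : Int) + 1).toNat = i.toNat + 1 := by omega
      rw [h2, hdrop]
      simp only [List.map_cons, pvP]
      ring

lemma pvCounts (clothes : List (List String)) :
    clothes.foldl (fun d c =>
        d.insert (PySem.List.pyGetD c 1 "") (d.getD (PySem.List.pyGetD c 1 "") 0 + 1))
      PySem.Dict.empty
    = PySem.Dict.counter (clothes.map (fun c => PySem.List.pyGetD c 1 "")) := by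
  rw [← PySem.Dict.foldl_insert_getD_add_one_eq_counter, List.foldl_map]

lemma pvLists (clothes : List (List String)) :
    ((pvDA clothes).keys.map (fun k => (pvDA clothes).getD k [])).map PySem.List.len
      = (PySem.Dict.counter (clothes.map (fun c => PySem.List.pyGetD c 1 ""))).values := by
  rw [pvDA_keys]
  simp only [PySem.Dict.values, PySem.Dict.items_counter, List.map_map, Function.comp_def]
  apply List.map_congr_left
  intro k _
  exact pvDA_len clothes k

lemma pvMain (clothes : List (List String)) : solution clothes = solution_alt clothes := by
  unfold solution solution_alt
  dsimp only
  rw [pvDictA clothes, pvArr (pvDA clothes), pvOuter, pvCounts]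
  have hB : ((PySem.Dict.counter (clothes.map (fun c => PySem.List.pyGetD c 1 ""))).values.foldl
      (fun (s : Int × Int) n => (s.1 + n * (1 + s.2), n * (1 + s.2))) (0, 0)).1
      = pvSeg (PySem.Dict.counter (clothes.map (fun c => PySem.List.pyGetD c 1 ""))).values := by
    rw [pvB_fold]; ring
  rw [hB, pvLists]

-- ===== VERDICT (by name: the statement is the Claim_ definition above) =====
theorem solution_spec : Claim_equal_solution := by
  intro clothes _ _
  unfold Spec_solution
  exact pvMain clothes
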